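-- pv_equiv track=rewrite | github.com/python/mypy | mypy/stubutil.py | find_unique_signatures
-- ===== SOURCE A (Python) =====
-- from typing import (Optional, Tuple, Sequence, MutableSequence, List, MutableMapping, IO,
--                     NamedTuple, Any)
--
-- Sig = Tuple[str, str]
--
-- def find_unique_signatures(sigs: Sequence[Sig]) -> List[Sig]:
--     sig_map = {}  # type: MutableMapping[str, List[str]]
--     for name, sig in sigs:
--         sig_map.setdefault(name, []).append(sig)
--     result = []
--     for name, name_sigs in sig_map.items():
--         if len(set(name_sigs)) == 1:
--             result.append((name, name_sigs[0]))
--     return sorted(result)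
-- ===== SOURCE B (Python) =====
-- def find_unique_signatures(sigs):
--     rep = {}
--     bad = set()
--     for name, sig in sigs:
--         if name not in rep:
--             rep[name] = sig
--         elif rep[name] != sig:
--             bad.add(name)
--     result = [(name, sig) for name, sig in rep.items() if name not in bad]
--     return sorted(result)
-- ===== Notes on version B (the rewrite author's own statement) =====
-- stated objective: simpler
-- what changed: B replaces the group-then-dedupe-each-group pass (dict of per-name lists, set() over every list) by single-pass streaming conflict detection: a dict holding each name's first signature and a set of conflicting names, then one filtered comprehension.
import Mathlib
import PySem

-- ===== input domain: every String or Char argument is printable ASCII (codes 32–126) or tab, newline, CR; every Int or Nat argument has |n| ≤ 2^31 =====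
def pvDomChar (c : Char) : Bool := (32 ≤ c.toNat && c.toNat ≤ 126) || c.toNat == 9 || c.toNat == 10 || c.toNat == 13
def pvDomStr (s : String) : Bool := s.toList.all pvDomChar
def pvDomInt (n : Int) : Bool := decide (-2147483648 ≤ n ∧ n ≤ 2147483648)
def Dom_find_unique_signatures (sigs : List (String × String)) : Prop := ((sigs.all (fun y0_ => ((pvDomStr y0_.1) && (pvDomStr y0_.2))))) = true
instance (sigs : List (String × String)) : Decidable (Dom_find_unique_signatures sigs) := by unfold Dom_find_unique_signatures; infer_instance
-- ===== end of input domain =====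

-- B replaces A's group-then-dedupe pass (dict of per-name signature lists, set() over each list)
-- by single-pass streaming conflict detection (first-signature dict + conflicting-name set); simpler, same result.

-- ===== PORT A =====
-- sig_map.setdefault(name, []).append(sig)  is  d[name] = d.get(name, []) + [sig]  = Dict.modify.
-- name_sigs[0] is in range on every reachable value (every stored list is nonempty), so pyGetD is exact here.
def find_unique_signatures (sigs : List (String × String)) : List (String × String) :=
  let sig_map : PySem.Dict String (List String) :=
    sigs.foldl (fun d p => d.modify p.1 [] (fun x => x ++ [p.2])) PySem.Dict.empty
  let result : List (String × String) :=
    sig_map.items.foldl (fun res kv =>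
      if (PySem.Set.ofList kv.2).length = 1 then res ++ [(kv.1, PySem.List.pyGetD kv.2 0 "")] else res) []
  PySem.List.sorted2 result (fun p => p.1) (fun p => p.2)

-- ===== PORT B =====
-- one step of B's loop: record the first signature of a new name, else flag a conflicting name
def pvBStep (st : PySem.Dict String String × PySem.Set String) (p : String × String) :
    PySem.Dict String String × PySem.Set String :=
  if st.1.contains p.1 = false then (st.1.insert p.1 p.2, st.2)
  else if st.1.getD p.1 "" ≠ p.2 then (st.1, PySem.Set.add st.2 p.1)
  else st

def find_unique_signatures_alt (sigs : List (String × String)) : List (String × String) :=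
  let st := sigs.foldl pvBStep (PySem.Dict.empty, PySem.Set.empty)
  let result := st.1.items.filter (fun kv => !(PySem.Set.contains st.2 kv.1))
  PySem.List.sorted2 result (fun p => p.1) (fun p => p.2)

-- ===== PRECONDITION & SPEC =====
def Spec_find_unique_signatures (sigs : List (String × String)) (out : List (String × String)) : Prop := out = find_unique_signatures_alt sigs
instance (sigs : List (String × String)) (out : List (String × String)) : Decidable (Spec_find_unique_signatures sigs out) := by unfold Spec_find_unique_signatures; infer_instance

-- ===== CLAIM (what is proved, stated in full; the proofs are below) =====
def Claim_equal_find_unique_signatures : Prop := ∀ (sigs : List (String × String)), Dom_find_unique_signatures sigs → Spec_find_unique_signatures sigs (find_unique_signatures sigs)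

-- ===== LEMMAS AND PROOFS =====

-- the signatures recorded under name k, in order
def pvGroup (sigs : List (String × String)) (k : String) : List String :=
  (sigs.filter (fun p => p.1 == k)).map (fun p => p.2)

lemma pvGroup_append (sigs : List (String × String)) (q : String × String) (k : String) :
    pvGroup (sigs ++ [q]) k = pvGroup sigs k ++ (if q.1 = k then [q.2] else []) := by
  by_cases h : q.1 = k <;> simp [pvGroup, List.filter_append, h]

lemma pvGroup_ne_nil_iff (sigs : List (String × String)) (k : String) :
    pvGroup sigs k ≠ [] ↔ k ∈ sigs.map (fun p => p.1) := by
  simp only [pvGroup, ne_eq, List.map_eq_nil_iff, List.filter_eq_nil_iff, List.mem_map]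
  push Not
  constructor
  · rintro ⟨p, hp, he⟩; exact ⟨p, hp, by simpa using he⟩
  · rintro ⟨p, hp, he⟩; exact ⟨p, hp, by simpa using he⟩

-- invariant of B's loop: keys are the names in first-occurrence order, rep holds each
-- name's first signature, bad holds exactly the names with a conflicting signature
lemma pvB_state (sigs : List (String × String)) :
    (sigs.foldl pvBStep (PySem.Dict.empty, PySem.Set.empty)).1.keys
        = PySem.Set.ofList (sigs.map (fun p => p.1))
    ∧ (∀ k, (sigs.foldl pvBStep (PySem.Dict.empty, PySem.Set.empty)).1.get? k = (pvGroup sigs k).head?)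
    ∧ (∀ k, k ∈ (sigs.foldl pvBStep (PySem.Dict.empty, PySem.Set.empty)).2 ↔
        ∃ s ∈ pvGroup sigs k, s ≠ (pvGroup sigs k).headI) := by
  induction sigs using List.reverseRecOn with
  | nil =>
    refine ⟨rfl, fun k => rfl, fun k => ?_⟩
    simp [pvGroup, PySem.Set.empty]
  | append_singleton sigs q ih =>
    rw [List.foldl_append] at *
    simp only [List.foldl_cons, List.foldl_nil]
    generalize hst : List.foldl pvBStep (PySem.Dict.empty, PySem.Set.empty) sigs = st at ih
    obtain ⟨hk, hg, hb⟩ := ih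
    have hcont : st.1.contains q.1 = (pvGroup sigs q.1).head?.isSome := by
      rw [PySem.Dict.contains_eq_isSome_get?, hg]
    by_cases hnil : pvGroup sigs q.1 = []
    · -- q.1 is a fresh name: insert branch
      have hcf : st.1.contains q.1 = false := by simp [hcont, hnil]
      have hnotmem : q.1 ∉ sigs.map (fun p => p.1) := by
        rw [← pvGroup_ne_nil_iff]; simp [hnil]
      have hstep : pvBStep st q = (st.1.insert q.1 q.2, st.2) := by
        simp [pvBStep, hcf]
      rw [hstep]
      refine ⟨?_, ?_, ?_⟩
      · rw [PySem.Dict.keys_insert_of_not_contains _ _ hcf, hk]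
        rw [PySem.Set.ofList_eq_foldl, PySem.Set.ofList_eq_foldl, List.map_append,
          List.foldl_append]
        simp only [List.map_cons, List.map_nil, List.foldl_cons, List.foldl_nil]
        rw [← PySem.Set.ofList_eq_foldl]
        have hc : (PySem.Set.ofList (sigs.map (fun p => p.1))).contains q.1 = false := by
          rw [Bool.eq_false_iff]
          intro hc
          exact hnotmem ((PySem.Set.mem_ofList _ _).1 (List.contains_iff_mem.1 hc))
        simp only [PySem.Set.add, hc, Bool.false_eq_true, if_false]
      · intro k
        rw [PySem.Dict.get?_insert, pvGroup_append]
        by_cases hkq : k = q.1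
        · subst hkq; simp [hnil]
        · rw [if_neg hkq, if_neg (Ne.symm hkq)]
          simp [hg]
      · intro k
        rw [pvGroup_append]
        by_cases hkq : q.1 = k
        · subst hkq
          rw [if_pos rfl, hnil]
          simp only [List.nil_append]
          rw [hb q.1, hnil]
          simp
        · rw [if_neg hkq, List.append_nil]; exact hb k
    · -- q.1 already present
      have hct : st.1.contains q.1 = true := by
        simp [hcont, Option.isSome_iff_ne_none, List.head?_eq_none_iff, hnil]
      obtain ⟨a, t, hat⟩ : ∃ a t, pvGroup sigs q.1 = a :: t := by
        cases h : pvGroup sigs q.1 with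
        | nil => exact absurd h hnil
        | cons a t => exact ⟨a, t, rfl⟩
      have hgd : st.1.getD q.1 "" = a := by
        rw [PySem.Dict.getD_eq_get?_getD, hg, hat]; rfl
      have hmemq : q.1 ∈ sigs.map (fun p => p.1) := (pvGroup_ne_nil_iff sigs q.1).1 hnil
      have hkeys : st.1.keys = PySem.Set.ofList ((sigs ++ [q]).map (fun p => p.1)) := by
        rw [hk, PySem.Set.ofList_eq_foldl, PySem.Set.ofList_eq_foldl, List.map_append,
          List.foldl_append]
        simp only [List.map_cons, List.map_nil, List.foldl_cons, List.foldl_nil]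
        rw [← PySem.Set.ofList_eq_foldl]
        simp [PySem.Set.add]
        obtain ⟨p, hp, hpe⟩ := List.mem_map.1 hmemq
        exact ⟨p.2, by rw [← hpe]; simpa using hp⟩
      have hget' : ∀ k, st.1.get? k = (pvGroup (sigs ++ [q]) k).head? := by
        intro k
        rw [hg, pvGroup_append]
        by_cases hkq : q.1 = k
        · subst hkq; rw [if_pos rfl, hat]; simp
        · rw [if_neg hkq, List.append_nil]
      by_cases hne : st.1.getD q.1 "" ≠ q.2
      · -- conflict: add q.1 to bad
        have hstep : pvBStep st q = (st.1, PySem.Set.add st.2 q.1) := by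
          simp [pvBStep, hct, hne]
        rw [hstep]
        refine ⟨hkeys, hget', ?_⟩
        intro k
        rw [PySem.Set.mem_add, pvGroup_append]
        by_cases hkq : q.1 = k
        · subst hkq
          rw [if_pos rfl, hat]
          constructor
          · intro _
            refine ⟨q.2, by simp, ?_⟩
            simp only [List.cons_append, List.headI_cons]
            intro h
            exact hne (by rw [hgd, h])
          · intro _; right; rfl
        · rw [if_neg hkq, List.append_nil]
          constructor
          · rintro (h | h)
            · exact (hb k).1 h
            · exact absurd h.symm hkq
          · intro h; exact Or.inl ((hb k).2 h)
      · -- duplicate identical signature: state unchanged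
        have hstep : pvBStep st q = st := by
          simp [pvBStep, hct, hne]
        rw [hstep]
        push Not at hne
        have hq2 : q.2 = a := by rw [← hgd, hne]
        refine ⟨hkeys, hget', ?_⟩
        intro k
        rw [pvGroup_append]
        by_cases hkq : q.1 = k
        · subst hkq
          rw [if_pos rfl, hat, hb q.1, hat]
          simp only [List.cons_append, List.headI_cons]
          constructor
          · rintro ⟨s, hs, hne'⟩
            exact ⟨s, by rw [List.mem_cons] at hs ⊢; simpa using hs.imp id Or.inl, hne'⟩
          · rintro ⟨s, hs, hne'⟩
            rw [List.mem_cons, List.mem_append, List.mem_singleton] at hs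
            rcases hs with hs | hs | hs
            · exact ⟨s, by simp [hs], hne'⟩
            · exact ⟨s, by simp [hs], hne'⟩
            · exact absurd (hs.trans hq2) hne'
        · rw [if_neg hkq, List.append_nil]; exact hb k

-- a nonempty list has a one-element set of distinct values iff all its members equal its head
lemma pvSet_len_one (a : String) (t : List String) :
    (PySem.Set.ofList (a :: t)).length = 1 ↔ ∀ s ∈ t, s = a := by
  have hmem : ∀ y, y ∈ PySem.Set.ofList (a :: t) ↔ y ∈ a :: t := PySem.Set.mem_ofList _
  have hnd : (PySem.Set.ofList (a :: t)).Nodup := PySem.Set.nodup_ofList _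
  constructor
  · intro h s hs
    obtain ⟨x, hx⟩ := List.length_eq_one_iff.1 h
    have hax : a = x := by have := (hmem a).2 (by simp); simpa [hx] using this
    have hsx : s = x := by have := (hmem s).2 (by simp [hs]); simpa [hx] using this
    rw [hsx, ← hax]
  · intro h
    have hall : ∀ y ∈ PySem.Set.ofList (a :: t), y = a := by
      intro y hy
      rcases List.mem_cons.1 ((hmem y).1 hy) with hy' | hy'
      · exact hy'
      · exact h y hy'
    have ha : a ∈ PySem.Set.ofList (a :: t) := (hmem a).2 (by simp)
    cases hS : PySem.Set.ofList (a :: t) with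
    | nil => rw [hS] at ha; simp at ha
    | cons x l =>
      cases l with
      | nil => rfl
      | cons y l' =>
        exfalso
        have hx : x = a := hall x (by rw [hS]; simp)
        have hy : y = a := hall y (by rw [hS]; simp)
        rw [hS] at hnd
        simp [hx, hy] at hnd

theorem find_unique_signatures_spec_aux (sigs : List (String × String)) :
    find_unique_signatures sigs = find_unique_signatures_alt sigs := by
  obtain ⟨hk, hg, hb⟩ := pvB_state sigs
  unfold find_unique_signatures find_unique_signatures_alt
  dsimp only
  generalize hst : List.foldl pvBStep (PySem.Dict.empty, PySem.Set.empty) sigs = st at hk hg hb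
  -- both pre-sort lists are built over the same nodup key list K
  set K := PySem.Set.ofList (sigs.map (fun p => p.1)) with hK
  have hndK : K.Nodup := PySem.Set.nodup_ofList _
  have hsig_keys : (sigs.foldl (fun d p => d.modify p.1 [] (fun x => x ++ [p.2]))
      PySem.Dict.empty).keys = K := by
    rw [PySem.Dict.keys_foldl_modify_key sigs (fun p => p.1) [] (fun _ p l => l ++ [p.2])
      PySem.Dict.empty]
    rw [hK, PySem.Set.ofList_eq_foldl]
    rfl
  have hsig_getD : ∀ k, (sigs.foldl (fun d p => d.modify p.1 [] (fun x => x ++ [p.2]))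
      PySem.Dict.empty).getD k [] = pvGroup sigs k := by
    intro k
    rw [PySem.Dict.getD_foldl_modify_append sigs PySem.Dict.empty k]
    simp [pvGroup, PySem.Dict.getD_empty]
  have hsig_items : (sigs.foldl (fun d p => d.modify p.1 [] (fun x => x ++ [p.2]))
      PySem.Dict.empty).items = K.map (fun k => (k, pvGroup sigs k)) := by
    rw [PySem.Dict.items_eq_map_keys _ (by rw [hsig_keys]; exact hndK) []]
    rw [hsig_keys]
    exact List.map_congr_left (fun k _ => by rw [hsig_getD k])
  have hst_items : st.1.items = K.map (fun k => (k, st.1.getD k "")) := by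
    rw [PySem.Dict.items_eq_map_keys _ (by rw [hk]; exact hndK) "", hk]
  rw [hsig_items, hst_items]
  have hA := PySem.List.foldl_append_if
    (fun kv : String × List String => decide ((PySem.Set.ofList kv.2).length = 1))
    (fun kv : String × List String => (kv.1, PySem.List.pyGetD kv.2 0 ""))
    (K.map (fun k => (k, pvGroup sigs k))) []
  simp only [decide_eq_true_eq] at hA
  rw [hA, List.nil_append, List.filter_map, List.filter_map, List.map_map]
  -- pointwise on k ∈ K: same keep-condition, same kept pair
  have hmemK : ∀ k ∈ K, ∃ a t, pvGroup sigs k = a :: t := by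
    intro k hkK
    have hne : pvGroup sigs k ≠ [] := by
      rw [pvGroup_ne_nil_iff]
      exact (PySem.Set.mem_ofList _ _).1 hkK
    cases h : pvGroup sigs k with
    | nil => exact absurd h hne
    | cons a t => exact ⟨a, t, rfl⟩
  have hfil : K.filter ((fun kv => decide ((PySem.Set.ofList kv.2).length = 1)) ∘
        (fun k => (k, pvGroup sigs k)))
      = K.filter ((fun kv => !PySem.Set.contains st.2 kv.1) ∘ (fun k => (k, st.1.getD k ""))) := by
    apply List.filter_congr
    intro k hkK
    obtain ⟨a, t, hat⟩ := hmemK k hkK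
    simp only [Function.comp_apply, hat]
    have hbk := hb k
    rw [hat] at hbk
    simp only [PySem.Set.contains]
    rw [Bool.eq_iff_iff]
    simp only [decide_eq_true_eq, Bool.not_eq_true', Bool.eq_false_iff, ne_eq,
      List.contains_iff_mem]
    rw [pvSet_len_one]
    constructor
    · intro h hc
      obtain ⟨s, hs, hne⟩ := hbk.1 hc
      simp only [List.headI_cons] at hne
      rcases List.mem_cons.1 hs with hs' | hs'
      · exact hne hs'
      · exact hne (h s hs')
    · intro h s hs
      by_contra hne
      exact h (hbk.2 ⟨s, by simp [hs], by simpa using hne⟩)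
  rw [hfil]
  apply congrArg (fun l => PySem.List.sorted2 l (fun p : String × String => p.1)
    (fun p : String × String => p.2))
  apply List.map_congr_left
  intro k hkf
  have hkK : k ∈ K := List.mem_of_mem_filter hkf
  obtain ⟨a, t, hat⟩ := hmemK k hkK
  simp only [Function.comp_apply]
  rw [hat, PySem.List.pyGetD_zero_cons, PySem.Dict.getD_eq_get?_getD, hg k, hat]
  rfl

-- ===== VERDICT (by name: the statement is the Claim_ definition above) =====
theorem find_unique_signatures_spec : Claim_equal_find_unique_signatures := by
  intro sigs _
  exact find_unique_signatures_spec_aux sigs
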